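-- pv_equiv track=rewrite | github.com/2hyunjinn/algorythm_all | 프로그래머스/1/118666. 성격 유형 검사하기/성격 유형 검사하기.py | solution
-- ===== SOURCE A (Python) =====
-- import collections
--
-- def solution(survey, choices):
--     answer = ''
--     for i in range(len(survey)) :
--         s = survey[i]
--         c = choices[i]
--         if (c < 4) : # 비동의라면
--             answer += ((4-c) * s[0])
--         elif(c > 4) : # 동의라면
--             answer += ((c%4) * s[1])
--
--     result = ''
--     cnt = collections.Counter(answer)
--     result += 'R' if (cnt['R'] >= cnt['T']) else 'T'
--     result += 'C' if (cnt['C'] >= cnt['F']) else 'F'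
--     result += 'J' if (cnt['J'] >= cnt['M']) else 'M'
--     result += 'A' if (cnt['A'] >= cnt['N']) else 'N'
--     return result
-- ===== SOURCE B (Python) =====
-- def solution(survey, choices):
--     rt = cf = jm = an = 0
--     for s, c in zip(survey, choices):
--         if c == 4:
--             continue
--         ch, w = (s[0], 4 - c) if c < 4 else (s[1], c % 4)
--         if ch == 'R':
--             rt += w
--         elif ch == 'T':
--             rt -= w
--         elif ch == 'C':
--             cf += w
--         elif ch == 'F':
--             cf -= w
--         elif ch == 'J':
--             jm += w
--         elif ch == 'M':
--             jm -= w
--         elif ch == 'A':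
--             an += w
--         elif ch == 'N':
--             an -= w
--     return (('R' if rt >= 0 else 'T') + ('C' if cf >= 0 else 'F')
--             + ('J' if jm >= 0 else 'M') + ('A' if an >= 0 else 'N'))
-- ===== Notes on version B (the rewrite author's own statement) =====
-- stated objective: simpler
-- what changed: Replaces A's letter-string repetition plus Counter tally and eight count comparisons with a single pass keeping one signed net score per dimension and a sign test per dimension; no intermediate string is built.
import Mathlib
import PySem

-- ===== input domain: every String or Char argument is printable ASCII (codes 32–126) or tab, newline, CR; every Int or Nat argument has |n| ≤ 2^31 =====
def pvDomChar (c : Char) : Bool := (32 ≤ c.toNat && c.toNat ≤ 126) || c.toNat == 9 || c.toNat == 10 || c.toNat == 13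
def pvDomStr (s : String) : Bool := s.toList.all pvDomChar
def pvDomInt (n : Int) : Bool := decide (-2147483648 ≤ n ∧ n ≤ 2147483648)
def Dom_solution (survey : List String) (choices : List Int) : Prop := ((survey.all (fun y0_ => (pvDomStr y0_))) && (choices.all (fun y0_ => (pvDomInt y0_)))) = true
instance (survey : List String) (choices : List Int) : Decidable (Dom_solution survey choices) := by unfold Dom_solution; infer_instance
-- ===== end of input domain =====

-- B replaces A's repeated-letter string + Counter tally + eight count comparisons with a
-- single pass over the pairs keeping one signed net score per dimension (objective: simpler).

-- ===== PORT A =====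
-- loop body of A: append (4-c)*s[0] when c<4, (c%4)*s[1] when c>4
def pvStepA (ans : List Char) (p : String × Int) : List Char :=
  if p.2 < 4 then ans ++ List.replicate (4 - p.2).toNat (PySem.List.pyGetD p.1.toList 0 ' ')
  else if p.2 > 4 then ans ++ List.replicate (PySem.Int.mod p.2 4).toNat (PySem.List.pyGetD p.1.toList 1 ' ')
  else ans

def solution (survey : List String) (choices : List Int) : String :=
  let answer : List Char :=
    (PySem.List.pyRange 0 (survey.length : Int) 1).foldl
      (fun answer i => pvStepA answer (PySem.List.pyGetD survey i "", PySem.List.pyGetD choices i 0)) []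
  let cnt : Char → Int := fun ch => (answer.count ch : Int)   -- collections.Counter lookup
  String.mk ((if cnt 'R' ≥ cnt 'T' then ['R'] else ['T'])
          ++ (if cnt 'C' ≥ cnt 'F' then ['C'] else ['F'])
          ++ (if cnt 'J' ≥ cnt 'M' then ['J'] else ['M'])
          ++ (if cnt 'A' ≥ cnt 'N' then ['A'] else ['N']))

-- ===== PORT B =====
-- loop body of B: add/subtract the weight on the net score of the letter's dimension
def pvStepB (acc : Int × Int × Int × Int) (p : String × Int) : Int × Int × Int × Int :=
  if p.2 = 4 then acc
  else
    let cw : Char × Int :=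
      if p.2 < 4 then (PySem.List.pyGetD p.1.toList 0 ' ', 4 - p.2)
      else (PySem.List.pyGetD p.1.toList 1 ' ', PySem.Int.mod p.2 4)
    let ch := cw.1; let w := cw.2
    let rt := acc.1; let cf := acc.2.1; let jm := acc.2.2.1; let an := acc.2.2.2
    if ch = 'R' then (rt + w, cf, jm, an)
    else if ch = 'T' then (rt - w, cf, jm, an)
    else if ch = 'C' then (rt, cf + w, jm, an)
    else if ch = 'F' then (rt, cf - w, jm, an)
    else if ch = 'J' then (rt, cf, jm + w, an)
    else if ch = 'M' then (rt, cf, jm - w, an)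
    else if ch = 'A' then (rt, cf, jm, an + w)
    else if ch = 'N' then (rt, cf, jm, an - w)
    else acc

def solution_alt (survey : List String) (choices : List Int) : String :=
  let nets := (survey.zip choices).foldl pvStepB (0, 0, 0, 0)
  String.mk ((if nets.1 ≥ 0 then ['R'] else ['T'])
          ++ (if nets.2.1 ≥ 0 then ['C'] else ['F'])
          ++ (if nets.2.2.1 ≥ 0 then ['J'] else ['M'])
          ++ (if nets.2.2.2 ≥ 0 then ['A'] else ['N']))

-- ===== PRECONDITION & SPEC =====
-- Pre_ excludes exactly the inputs where A raises IndexError: choices shorter than survey,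
-- or a survey string too short for the character A reads (s[0] when c<4, s[1] when c>4).
def Pre_solution (survey : List String) (choices : List Int) : Prop :=
  survey.length ≤ choices.length ∧
  ∀ p ∈ survey.zip choices,
    (p.2 < 4 → 1 ≤ p.1.toList.length) ∧ (4 < p.2 → 2 ≤ p.1.toList.length)
instance (survey : List String) (choices : List Int) : Decidable (Pre_solution survey choices) := by
  unfold Pre_solution; infer_instance

def pvWitness_solution : List String × List Int := (["RT", "CF", "JM", "AN"], [1, 5, 4, 7])

def Spec_solution (survey : List String) (choices : List Int) (out : String) : Prop := out = solution_alt survey choices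
instance (survey : List String) (choices : List Int) (out : String) : Decidable (Spec_solution survey choices out) := by unfold Spec_solution; infer_instance

-- ===== CLAIM (what is proved, stated in full; the proofs are below) =====
def Claim_equal_solution : Prop := ∀ (survey : List String) (choices : List Int), Dom_solution survey choices → Pre_solution survey choices → Spec_solution survey choices (solution survey choices)

-- ===== LEMMAS AND PROOFS =====

-- net scores of A's answer string: the (R−T, C−F, J−M, A−N) count differences
def pvNets (ans : List Char) : Int × Int × Int × Int :=
  ((ans.count 'R' : Int) - (ans.count 'T' : Int),
   (ans.count 'C' : Int) - (ans.count 'F' : Int),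
   (ans.count 'J' : Int) - (ans.count 'M' : Int),
   (ans.count 'A' : Int) - (ans.count 'N' : Int))

lemma pvNets_append_replicate {rt cf jm an : Int} (ans : List Char) (n : Nat) (ch : Char)
    (h : pvNets ans = (rt, cf, jm, an)) :
    pvNets (ans ++ List.replicate n ch) =
      (if ch = 'R' then (rt + n, cf, jm, an)
       else if ch = 'T' then (rt - n, cf, jm, an)
       else if ch = 'C' then (rt, cf + n, jm, an)
       else if ch = 'F' then (rt, cf - n, jm, an)
       else if ch = 'J' then (rt, cf, jm + n, an)
       else if ch = 'M' then (rt, cf, jm - n, an)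
       else if ch = 'A' then (rt, cf, jm, an + n)
       else if ch = 'N' then (rt, cf, jm, an - n)
       else (rt, cf, jm, an)) := by
  simp only [pvNets, Prod.mk.injEq] at h
  obtain ⟨h1, h2, h3, h4⟩ := h
  split_ifs with g1 g2 g3 g4 g5 g6 g7 g8 <;>
    subst_vars <;>
    simp only [pvNets, List.count_append, List.count_replicate, Prod.mk.injEq] <;>
    norm_num <;>
    (try simp [g1]) <;> (try simp_all) <;> omega

lemma pvStep_comm (ans : List Char) (p : String × Int) :
    pvStepB (pvNets ans) p = pvNets (pvStepA ans p) := by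
  obtain ⟨s, c⟩ := p
  rcases lt_trichotomy c 4 with hc | hc | hc
  · have hw : ((4 - c).toNat : Int) = 4 - c := Int.toNat_of_nonneg (by omega)
    simp only [pvStepA, pvStepB, if_pos hc, if_neg (by omega : ¬ c = 4)]
    rw [pvNets_append_replicate ans _ _ rfl]
    simp only [hw]
    split_ifs <;> simp [pvNets]
  · simp [pvStepA, pvStepB, hc]
  · have hw : ((PySem.Int.mod c 4).toNat : Int) = PySem.Int.mod c 4 :=
      Int.toNat_of_nonneg (PySem.Int.mod_nonneg c (by omega))
    simp only [pvStepA, pvStepB, if_neg (by omega : ¬ c < 4), if_pos hc,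
      if_neg (by omega : ¬ c = 4)]
    rw [pvNets_append_replicate ans _ _ rfl]
    simp only [hw]
    split_ifs <;> simp [pvNets]

lemma pvFold_inv (zs : List (String × Int)) :
    ∀ ans : List Char, zs.foldl pvStepB (pvNets ans) = pvNets (zs.foldl pvStepA ans) := by
  induction zs with
  | nil => intro ans; rfl
  | cons p zs ih => intro ans; simp only [List.foldl_cons, pvStep_comm]; exact ih _

-- A's index loop over range(len(survey)) equals the fold over zip(survey, choices)
lemma pvLoop_zip (survey : List String) (choices : List Int)
    (h : survey.length ≤ choices.length) :
    (PySem.List.pyRange 0 (survey.length : Int) 1).foldl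
      (fun answer i => pvStepA answer (PySem.List.pyGetD survey i "", PySem.List.pyGetD choices i 0)) []
    = (survey.zip choices).foldl pvStepA [] := by
  have hlen : (survey.zip choices).length = survey.length := by
    simp [List.length_zip]; omega
  calc (PySem.List.pyRange 0 (survey.length : Int) 1).foldl
        (fun answer i => pvStepA answer (PySem.List.pyGetD survey i "", PySem.List.pyGetD choices i 0)) []
      = (PySem.List.pyRange 0 ((survey.zip choices).length : Int) 1).foldl
        (fun answer i => pvStepA answer (PySem.List.pyGetD (survey.zip choices) i ("", 0))) [] := by
        rw [hlen]
        refine PySem.List.foldl_congr_mem _ _ _ _ (fun acc i hi => ?_)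
        rw [PySem.List.mem_pyRange_one] at hi
        have h0 : 0 ≤ i := hi.1
        have h1 : i < (survey.length : Int) := hi.2
        rw [PySem.List.pyGetD_eq_getElem survey "" h0 (by omega),
            PySem.List.pyGetD_eq_getElem choices 0 h0 (by omega),
            PySem.List.pyGetD_eq_getElem (survey.zip choices) ("", 0) h0 (by omega)]
        simp [List.getElem_zip]
    _ = (survey.zip choices).foldl pvStepA [] :=
        PySem.List.foldl_pyRange_zero_pyGetD (survey.zip choices) ("", 0) pvStepA []

-- ===== VERDICT (by name: the statement is the Claim_ definition above) =====
theorem solution_spec : Claim_equal_solution := by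
  intro survey choices _ hpre
  unfold Spec_solution solution solution_alt
  rw [pvLoop_zip survey choices hpre.1]
  rw [show (survey.zip choices).foldl pvStepB (0, 0, 0, 0)
      = pvNets ((survey.zip choices).foldl pvStepA []) from pvFold_inv (survey.zip choices) []]
  set ans := (survey.zip choices).foldl pvStepA []
  simp only [pvNets, ge_iff_le, sub_nonneg]
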